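-- pv_equiv track=rewrite | github.com/brodiemilliken/LLMPress | src/decoder.py | decode_byte_stream
-- ===== SOURCE A (Python) =====
-- def decode_byte_stream(byte_stream):
--     """Decode the byte stream into a list of tokens.
--        Returns a list of tuples (is_raw, value)."""
--     tokens = []
--     i = 0
--     n = len(byte_stream)
--     while i < n:
--         byte = byte_stream[i]
--         is_raw = (byte >> 7) & 1
--         if is_raw == 0:
--             # Rank token: the payload is the rank value (bits 5-0)
--             value = byte & 0x3F
--             tokens.append((False, value))
--             i += 1
--         else:
--             # Raw token: decode a variable-length value.
--             raw_value = 0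
--             shift = 0
--             # Continue reading bytes until we encounter a byte with is_ascii = 1.
--             while True:
--                 b = byte_stream[i]
--                 payload = b & 0x3F
--                 raw_value |= (payload << shift)
--                 shift += 6
--                 # Check if this byte is the terminator (both is_raw and is_ascii are 1).
--                 ascii_flag = (b >> 6) & 1
--                 i += 1
--                 if ascii_flag == 1:
--                     break
--                 if i >= n:
--                     raise ValueError("Unexpected end of stream while decoding a raw token.")
--             tokens.append((True, raw_value))
--     return tokens
-- ===== SOURCE B (Python) =====
-- def decode_byte_stream(byte_stream):
--     """Decode the byte stream into a list of tokens.
--        Returns a list of tuples (is_raw, value)."""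
--     tokens = []
--     i = 0
--     n = len(byte_stream)
--     while i < n:
--         if (byte_stream[i] >> 7) & 1 == 0:
--             tokens.append((False, byte_stream[i] & 0x3F))
--             i += 1
--         else:
--             # Raw token: find the terminator (ascii bit set), take the chunk,
--             # then combine the 6-bit payloads back-to-front in one fold.
--             j = i
--             while (byte_stream[j] >> 6) & 1 == 0:
--                 j += 1
--                 if j >= n:
--                     raise ValueError("Unexpected end of stream while decoding a raw token.")
--             chunk = byte_stream[i:j + 1]
--             value = 0
--             for b in reversed(chunk):
--                 value = value * 64 + (b & 0x3F)
--             tokens.append((True, value))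
--             i = j + 1
--     return tokens
-- ===== Notes on version B (the rewrite author's own statement) =====
-- stated objective: alternative
-- what changed: A decodes a raw token with a nested while-True loop that ORs each 6-bit payload into an accumulator at a growing shift; B instead scans ahead for the terminator byte, slices the chunk out, and folds its payloads back-to-front with value*64 + payload, so the variable-shift OR accumulator disappears.
import Mathlib
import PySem

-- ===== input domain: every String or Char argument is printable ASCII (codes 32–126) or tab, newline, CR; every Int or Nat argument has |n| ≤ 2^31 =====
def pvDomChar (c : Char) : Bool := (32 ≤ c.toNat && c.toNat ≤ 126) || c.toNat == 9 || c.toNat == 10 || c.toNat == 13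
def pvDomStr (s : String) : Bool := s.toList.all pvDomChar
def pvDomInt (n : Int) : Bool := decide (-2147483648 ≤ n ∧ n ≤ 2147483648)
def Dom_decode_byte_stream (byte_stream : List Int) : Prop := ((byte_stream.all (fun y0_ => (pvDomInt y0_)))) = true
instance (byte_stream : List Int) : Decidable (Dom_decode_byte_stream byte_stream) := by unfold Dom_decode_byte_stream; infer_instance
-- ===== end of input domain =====

-- B re-decomposes the decoder: instead of A's nested while loops with an OR/shift
-- accumulator, B locates the raw token's terminator, slices the chunk out and folds
-- its payloads back-to-front (value*64 + payload); objective: alternative decomposition.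

-- ===== PORT A =====
-- inner `while True` loop of A: consumes bytes, OR-ing payloads at increasing shifts;
-- returns (raw_value, remaining bytes).  On exhaustion without a terminator Python
-- raises ValueError: that input is excluded by Pre_, the port just returns there.
def pvDecodeRawA : List Int → Int → Nat → Int × List Int
  | [], raw_value, _ => (raw_value, [])          -- Python: raise ValueError (outside Pre_)
  | b :: rest, raw_value, shift =>
    let payload := PySem.Int.band b 63
    let rv := PySem.Int.bor raw_value (payload <<< shift)
    if PySem.Int.band (b >>> 6) 1 = 1 then (rv, rest)
    else pvDecodeRawA rest rv (shift + 6)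

theorem pvDecodeRawA_len : ∀ (rest : List Int) (b v : Int) (s : Nat),
    (pvDecodeRawA (b :: rest) v s).2.length ≤ rest.length := by
  intro rest
  induction rest with
  | nil => intro b v s; simp [pvDecodeRawA]
  | cons b' rest' ih =>
    intro b v s
    simp only [pvDecodeRawA]
    split
    · simp
    · exact le_trans (ih b' _ _) (by simp)

def decode_byte_stream (byte_stream : List Int) : List (Bool × Int) :=
  match byte_stream with
  | [] => []
  | byte :: rest =>
    if PySem.Int.band (byte >>> 7) 1 = 0 then
      (false, PySem.Int.band byte 63) :: decode_byte_stream rest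
    else
      let p := pvDecodeRawA (byte :: rest) 0 0
      (true, p.1) :: decode_byte_stream p.2
  termination_by byte_stream.length
  decreasing_by
  · simp
  · have := pvDecodeRawA_len rest byte 0 0
    simp
    omega

-- ===== PORT B =====
-- index of the first byte whose ascii bit is set (B's inner `while` scan for j)
def pvFindTerm : List Int → Option Nat
  | [] => none
  | b :: rest =>
    if PySem.Int.band (b >>> 6) 1 = 0 then (pvFindTerm rest).map (· + 1) else some 0

-- B's `for b in reversed(chunk): value = value * 64 + (b & 0x3F)`
def pvRawVal (chunk : List Int) : Int :=
  chunk.foldr (fun b acc => acc * 64 + PySem.Int.band b 63) 0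

def decode_byte_stream_alt (byte_stream : List Int) : List (Bool × Int) :=
  match byte_stream with
  | [] => []
  | b :: rest =>
    if PySem.Int.band (b >>> 7) 1 = 0 then
      (false, PySem.Int.band b 63) :: decode_byte_stream_alt rest
    else
      match pvFindTerm (b :: rest) with
      | none => []                               -- Python: raise ValueError (outside Pre_)
      | some j =>
        (true, pvRawVal ((b :: rest).take (j + 1))) ::
          decode_byte_stream_alt ((b :: rest).drop (j + 1))
  termination_by byte_stream.length
  decreasing_by
  · simp
  · simp

-- ===== PRECONDITION & SPEC =====
-- Pre_ excludes exactly the inputs on which A raises ValueError: streams where some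
-- suffix starts a raw token (high bit set) but no byte of the suffix carries the
-- ascii/terminator bit, so the inner loop runs off the end of the stream.
def Pre_decode_byte_stream (byte_stream : List Int) : Prop :=
  ∀ t ∈ byte_stream.tails, t ≠ [] → PySem.Int.band (t.head! >>> 7) 1 = 1 →
    ∃ x ∈ t, PySem.Int.band (x >>> 6) 1 = 1

instance (byte_stream : List Int) : Decidable (Pre_decode_byte_stream byte_stream) := by
  unfold Pre_decode_byte_stream; infer_instance

def pvWitness_decode_byte_stream : List Int := [5, 193]

def Spec_decode_byte_stream (byte_stream : List Int) (out : List (Bool × Int)) : Prop := out = decode_byte_stream_alt byte_stream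
instance (byte_stream : List Int) (out : List (Bool × Int)) : Decidable (Spec_decode_byte_stream byte_stream out) := by unfold Spec_decode_byte_stream; infer_instance

-- ===== CLAIM (what is proved, stated in full; the proofs are below) =====
def Claim_equal_decode_byte_stream : Prop := ∀ (byte_stream : List Int), Dom_decode_byte_stream byte_stream → Pre_decode_byte_stream byte_stream → Spec_decode_byte_stream byte_stream (decode_byte_stream byte_stream)

-- ===== LEMMAS AND PROOFS =====

-- b & 0x3F is a 6-bit payload, also for negative b (Python two's complement)
theorem pv_band63_bounds (b : Int) : 0 ≤ PySem.Int.band b 63 ∧ PySem.Int.band b 63 < 64 := by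
  unfold PySem.Int.band
  have h63 : ((63:Int)).toNat = 63 := rfl
  split
  · rw [if_pos (by norm_num : (0:Int) ≤ 63), h63]
    have h : b.toNat &&& 63 ≤ 63 := Nat.and_le_right
    omega
  · rw [if_pos (by norm_num : (0:Int) ≤ 63), h63]
    have h : 63 &&& (-b-1).toNat ≤ 63 := Nat.and_le_left
    omega

-- (x >> k) & 1 is a bit
theorem pv_band1_cases (a : Int) : PySem.Int.band a 1 = 0 ∨ PySem.Int.band a 1 = 1 := by
  rw [PySem.Int.band_one]
  have h1 := PySem.Int.mod_nonneg a (b := 2) (by norm_num)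
  have h2 := PySem.Int.mod_lt a (b := 2) (by norm_num)
  omega

-- OR-ing a shifted value into a smaller accumulator is addition (Nat level)
theorem pv_lor_shift_add (a b s : Nat) (h : a < 2^s) : a ||| (b <<< s) = a + b * 2^s := by
  apply Nat.eq_of_testBit_eq
  intro i
  rw [Nat.testBit_lor, Nat.testBit_shiftLeft]
  rcases lt_or_ge i s with hi | hi
  · have hs : ¬ s ≤ i := by omega
    simp only [hs, decide_false, Bool.false_and, Bool.or_false]
    rw [Nat.testBit_eq_decide_div_mod_eq, Nat.testBit_eq_decide_div_mod_eq]
    have h2 : (a + b * 2^s) / 2^i = a / 2^i + b * 2^(s-i) := by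
      rw [show 2^s = 2^i * 2^(s-i) by rw [← pow_add]; congr 1; omega]
      rw [show a + b * (2^i * 2^(s-i)) = a + (b * 2^(s-i)) * 2^i by ring]
      rw [Nat.add_mul_div_right _ _ (Nat.two_pow_pos i)]
    have h3 : b * 2^(s-i) % 2 = 0 := by
      rw [show s-i = (s-i-1)+1 by omega, pow_succ, ← mul_assoc]
      simp [Nat.mul_mod_left]
    rw [h2]
    simp only [decide_eq_decide]
    omega
  · simp only [hi, decide_true, Bool.true_and]
    have ha : a.testBit i = false :=
      Nat.testBit_lt_two_pow (lt_of_lt_of_le h (Nat.pow_le_pow_right (by norm_num) hi))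
    rw [ha, Bool.false_or]
    rw [Nat.testBit_eq_decide_div_mod_eq, Nat.testBit_eq_decide_div_mod_eq]
    have h2 : (a + b * 2^s) / 2^i = b / 2^(i-s) := by
      rw [show (2:Nat)^i = 2^s * 2^(i-s) by rw [← pow_add]; congr 1; omega]
      rw [← Nat.div_div_eq_div_mul]
      congr 1
      rw [Nat.add_mul_div_right _ _ (Nat.two_pow_pos s), Nat.div_eq_of_lt h, Nat.zero_add]
    rw [h2]

-- the same fact lifted to Int, as A's `raw_value |= payload << shift` uses it
theorem pv_bor_shift_add (v p : Int) (s : Nat) (hv : 0 ≤ v) (hlt : v < 2^s) (hp : 0 ≤ p) :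
    PySem.Int.bor v (p <<< s) = v + 2^s * p := by
  have hsh : p <<< s = p * 2^s := Int.shiftLeft_eq p s
  have hshn : (0:Int) ≤ p * 2^s := mul_nonneg hp (by positivity)
  rw [hsh, PySem.Int.bor_of_nonneg hv hshn]
  have h2s : ((2:Int)^s).toNat = 2^s := by
    rw [show ((2:Int)^s) = ((2^s : Nat) : Int) by push_cast; ring]
    exact Int.toNat_natCast _
  have h1 : (p * 2^s).toNat = p.toNat * 2^s := by
    rw [Int.toNat_mul hp (by positivity), h2s]
  have h3 : v.toNat < 2^s := by omega
  rw [show p.toNat * 2^s = p.toNat <<< s by rw [Nat.shiftLeft_eq]] at h1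
  rw [h1, pv_lor_shift_add _ _ _ h3]
  push_cast
  rw [Int.toNat_of_nonneg hv, Int.toNat_of_nonneg hp]
  ring

-- A's inner loop computes the chunk fold that B computes
theorem pv_raw_eq : ∀ (bs : List Int) (v : Int) (s : Nat), 0 ≤ v → v < 2^s →
    pvDecodeRawA bs v s =
      (match pvFindTerm bs with
       | none => (v + 2^s * pvRawVal bs, ([] : List Int))
       | some j => (v + 2^s * pvRawVal (bs.take (j+1)), bs.drop (j+1))) := by
  intro bs
  induction bs with
  | nil => intro v s hv hlt; simp [pvDecodeRawA, pvFindTerm, pvRawVal]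
  | cons b rest ih =>
    intro v s hv hlt
    have hpay := pv_band63_bounds b
    have hbor : PySem.Int.bor v (PySem.Int.band b 63 <<< s) = v + 2^s * PySem.Int.band b 63 :=
      pv_bor_shift_add v _ s hv hlt hpay.1
    have h64 : (2:Int)^(s+6) = 2^s * 64 := by rw [pow_add]; norm_num
    rcases pv_band1_cases (b >>> 6) with h6 | h6
    · -- not the terminator: A recurses, B's scan moves right
      simp only [pvDecodeRawA, pvFindTerm, h6, if_true]
      rw [if_neg (by omega), hbor]
      rw [ih _ (s+6) (by nlinarith [hpay.1, pow_pos (show (0:Int) < 2 by norm_num) s])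
            (by nlinarith [pow_pos (show (0:Int) < 2 by norm_num) s])]
      cases hft : pvFindTerm rest with
      | none =>
        simp only [Option.map_none]
        have : pvRawVal (b :: rest) = pvRawVal rest * 64 + PySem.Int.band b 63 := by
          simp [pvRawVal]
        rw [this, h64]
        simp only [Prod.mk.injEq]
        exact ⟨by ring, trivial⟩
      | some j =>
        simp only [Option.map_some]
        have ht : (b :: rest).take (j+1+1) = b :: rest.take (j+1) := rfl
        have hd : (b :: rest).drop (j+1+1) = rest.drop (j+1) := rfl
        rw [ht, hd]
        have : pvRawVal (b :: rest.take (j+1)) =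
            pvRawVal (rest.take (j+1)) * 64 + PySem.Int.band b 63 := by simp [pvRawVal]
        rw [this, h64]
        simp only [Prod.mk.injEq]
        exact ⟨by ring, trivial⟩
    · -- terminator byte: both stop here
      have hfe : pvFindTerm (b :: rest) = some 0 := by
        unfold pvFindTerm
        rw [if_neg (by omega)]
      simp only [hfe, pvDecodeRawA, if_pos h6, hbor]
      simp [pvRawVal]

-- B's terminator scan succeeds when some byte of the run carries the ascii bit
theorem pv_findTerm_some : ∀ (bs : List Int),
    (∃ x ∈ bs, PySem.Int.band (x >>> 6) 1 = 1) → ∃ j, pvFindTerm bs = some j := by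
  intro bs
  induction bs with
  | nil => rintro ⟨x, hx, _⟩; cases hx
  | cons b rest ih =>
    rintro ⟨x, hx, hx6⟩
    by_cases hb : PySem.Int.band (b >>> 6) 1 = 0
    · rcases List.mem_cons.mp hx with heq | hmem
      · subst heq; omega
      · obtain ⟨j, hj⟩ := ih ⟨x, hmem, hx6⟩
        exact ⟨j + 1, by simp [pvFindTerm, hb, hj]⟩
    · exact ⟨0, by simp [pvFindTerm, hb]⟩

-- Pre_ is inherited by every suffix of the stream
theorem pv_pre_suffix {bs l : List Int} (h : Pre_decode_byte_stream bs) (hs : l <:+ bs) :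
    Pre_decode_byte_stream l := by
  intro t ht hne hh
  exact h t ((List.mem_tails _ _).mpr (((List.mem_tails _ _).mp ht).trans hs)) hne hh

theorem pv_main : ∀ (n : Nat) (bs : List Int), bs.length ≤ n → Pre_decode_byte_stream bs →
    decode_byte_stream bs = decode_byte_stream_alt bs := by
  intro n
  induction n with
  | zero =>
    intro bs hlen _
    have : bs = [] := List.eq_nil_of_length_eq_zero (by omega)
    subst this
    simp [decode_byte_stream, decode_byte_stream_alt]
  | succ n ih =>
    intro bs hlen hpre
    cases bs with
    | nil => simp [decode_byte_stream, decode_byte_stream_alt]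
    | cons b rest =>
      by_cases h7 : PySem.Int.band (b >>> 7) 1 = 0
      · simp only [decode_byte_stream, decode_byte_stream_alt, h7, if_true]
        rw [ih rest (by simp at hlen; omega)
            (pv_pre_suffix hpre (List.suffix_cons b rest))]
      · have h7' : PySem.Int.band (b >>> 7) 1 = 1 := by
          rcases pv_band1_cases (b >>> 7) with h | h <;> omega
        have hex : ∃ x ∈ b :: rest, PySem.Int.band (x >>> 6) 1 = 1 :=
          hpre (b :: rest) ((List.mem_tails _ _).mpr (List.suffix_refl _)) (by simp) (by simp [h7'])
        obtain ⟨j, hft⟩ := pv_findTerm_some _ hex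
        simp only [decode_byte_stream, decode_byte_stream_alt, h7]
        rw [pv_raw_eq (b :: rest) 0 0 le_rfl (by norm_num), hft]
        simp only [pow_zero, one_mul, zero_add]
        rw [ih ((b :: rest).drop (j+1)) (by simp at hlen ⊢; omega)
            (pv_pre_suffix hpre (List.drop_suffix _ _))]
        simp

-- ===== VERDICT (by name: the statement is the Claim_ definition above) =====
theorem decode_byte_stream_spec : Claim_equal_decode_byte_stream := by
  intro bs _hdom hpre
  unfold Spec_decode_byte_stream
  exact pv_main bs.length bs le_rfl hpre
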